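-- pv_equiv track=rewrite | github.com/JinHo-von-Choi/pgkit | services/sql_executor.py | _split_queries
-- ===== SOURCE A (Python) =====
-- from typing import Callable, List, Optional
--
-- def _split_queries(sql: str) -> List[str]:
--     """
--     SQL 텍스트를 개별 쿼리로 분리한다.
--
--     세미콜론(;) 기준으로 분할하되, 다음을 고려한다:
--         - 주석 전용 줄(-- 시작)과 빈 줄은 현재 쿼리 버퍼에 포함하되
--           독립 쿼리로 분리하지 않는다.
--         - $$ (Dollar-Quoted String) 블록 내부의 세미콜론은 분리 대상에서 제외한다.
--           PostgreSQL 함수/프로시저 본문에서 사용되는 패턴이다.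
--         - 주석만으로 구성된 쿼리는 최종 결과에서 제외한다.
--
--     @param sql  분리 대상 SQL 텍스트 (파일 전체 내용)
--     @returns    개별 쿼리 문자열 리스트 (빈 쿼리 제외)
--
--     @example
--         queries = executor._split_queries("SELECT 1; SELECT 2;")
--         # -> ["SELECT 1;", "SELECT 2;"]
--
--     시간 복잡도: O(n) - SQL 텍스트를 한 번만 순회
--     """
--     queries   = []
--     current   = []
--     in_dollar = False
--
--     for line in sql.split("\n"):
--         stripped = line.strip()
--
--         # 주석 줄이나 빈 줄은 현재 버퍼에 누적만 한다
--         if stripped.startswith("--") or not stripped: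
--             current.append(line)
--             continue
--
--         # $$ 토큰 감지: 홀수 개 등장 시 dollar-quote 블록 진입/이탈 토글
--         if "$$" in line:
--             count = line.count("$$")
--             if count % 2 == 1:
--                 in_dollar = not in_dollar
--
--         # dollar-quote 블록 내부에서는 세미콜론을 무시한다
--         if in_dollar:
--             current.append(line)
--             continue
--
--         # 세미콜론으로 끝나는 줄에서 쿼리를 분리한다
--         if stripped.endswith(";"):
--             current.append(line)
--             query = "\n".join(current).strip()
--             # 주석만으로 구성된 쿼리는 제외
--             if query and not all(
--                 l.strip().startswith("--") or not l.strip()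
--                 for l in query.split("\n")
--             ):
--                 queries.append(query)
--             current = []
--         else:
--             current.append(line)
--
--     # 파일 끝에 세미콜론 없이 남은 쿼리 처리
--     if current:
--         query = "\n".join(current).strip()
--         if query and not all(
--             l.strip().startswith("--") or not l.strip()
--             for l in query.split("\n")
--         ):
--             queries.append(query)
--
--     return queries
-- ===== SOURCE B (Python) =====
-- from typing import List, Tuple
--
--
-- def _next_query(lines: List[str], in_dollar: bool) -> Tuple[List[str], List[str], bool]:
--     """Peel the shortest prefix of `lines` ending at a statement boundary
--     (a non-comment line ending in ';' outside a dollar-quoted block);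
--     if no boundary exists, the whole list is the segment."""
--     for i, line in enumerate(lines):
--         stripped = line.strip()
--         if stripped.startswith("--") or not stripped:
--             continue
--         if "$$" in line and line.count("$$") % 2 == 1:
--             in_dollar = not in_dollar
--         if not in_dollar and stripped.endswith(";"):
--             return lines[:i + 1], lines[i + 1:], in_dollar
--     return lines, [], in_dollar
--
--
-- def _split_queries(sql: str) -> List[str]:
--     queries = []
--     lines = sql.split("\n")
--     in_dollar = False
--     while lines:
--         segment, lines, in_dollar = _next_query(lines, in_dollar)
--         query = "\n".join(segment).strip()
--         if query and not all(
--             l.strip().startswith("--") or not l.strip()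
--             for l in query.split("\n")
--         ):
--             queries.append(query)
--     return queries
-- ===== Notes on version B (the rewrite author's own statement) =====
-- stated objective: alternative
-- what changed: A is one fold over lines maintaining a (queries, current-buffer, in_dollar) state machine with an inline flush plus a duplicated end-of-input flush; B is an outer while loop that repeatedly peels one whole statement at a time via a _next_query helper that scans ahead for the boundary line and returns (segment, rest, state), so there is a single render-and-filter site and no buffer state in the driver.
import Mathlib
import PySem

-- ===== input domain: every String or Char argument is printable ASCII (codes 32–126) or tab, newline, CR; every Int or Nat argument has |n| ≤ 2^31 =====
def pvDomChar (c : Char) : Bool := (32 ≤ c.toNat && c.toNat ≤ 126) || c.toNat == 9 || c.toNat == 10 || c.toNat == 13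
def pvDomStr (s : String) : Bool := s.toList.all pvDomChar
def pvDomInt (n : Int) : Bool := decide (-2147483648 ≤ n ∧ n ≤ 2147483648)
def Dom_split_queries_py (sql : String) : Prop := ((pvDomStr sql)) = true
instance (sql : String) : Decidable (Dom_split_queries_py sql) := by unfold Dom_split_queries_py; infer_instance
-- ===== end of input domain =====

-- B replaces A's single fold with (queries, buffer, in_dollar) state and two flush sites
-- by an outer loop that peels one whole statement at a time with a boundary-scanning
-- helper; same O(n) cost, a different decomposition.

-- the comment-only/empty filter, the same expression in both Pythons
def pvKeep (q : String) : Bool :=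
  (q != "") &&
    !(((PySem.Str.split? q "\n").getD []).all
        (fun l => PySem.Str.startswith (PySem.Str.strip l) "--" || PySem.Str.strip l == ""))

-- ===== PORT A =====
def pvStepA (st : List String × List String × Bool) (line : String) :
    List String × List String × Bool :=
  let (queries, current, inD) := st
  let stripped := PySem.Str.strip line
  if PySem.Str.startswith stripped "--" || stripped == "" then
    (queries, current ++ [line], inD)
  else
    let inD := if PySem.Str.isIn "$$" line then
                 (if PySem.Str.count line "$$" % 2 == 1 then !inD else inD)
               else inD
    if inD then
      (queries, current ++ [line], inD)
    else if PySem.Str.endswith stripped ";" then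
      let cur := current ++ [line]
      let query := PySem.Str.strip (PySem.Str.join "\n" cur)
      (if pvKeep query then queries ++ [query] else queries, [], inD)
    else
      (queries, current ++ [line], inD)

def split_queries_py (sql : String) : List String :=
  let st := ((PySem.Str.split? sql "\n").getD []).foldl pvStepA ([], [], false)
  let queries := st.1
  let current := st.2.1
  if current != [] then
    let query := PySem.Str.strip (PySem.Str.join "\n" current)
    if pvKeep query then queries ++ [query] else queries
  else queries

-- ===== PORT B =====
-- the for-with-early-return of Python's _next_query as the obvious structural recursion
def pvNextQuery : List String → Bool → (List String × List String × Bool)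
  | [], inD => ([], [], inD)
  | line :: rest, inD =>
    let stripped := PySem.Str.strip line
    if PySem.Str.startswith stripped "--" || stripped == "" then
      let r := pvNextQuery rest inD
      (line :: r.1, r.2.1, r.2.2)
    else
      let inD := if PySem.Str.isIn "$$" line && PySem.Str.count line "$$" % 2 == 1
                 then !inD else inD
      if !inD && PySem.Str.endswith stripped ";" then
        ([line], rest, inD)
      else
        let r := pvNextQuery rest inD
        (line :: r.1, r.2.1, r.2.2)

lemma pvNextQuery_rest_len (lines : List String) (d : Bool) :
    (pvNextQuery lines d).2.1.length ≤ lines.length := by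
  induction lines generalizing d with
  | nil => simp [pvNextQuery]
  | cons line rest ih =>
    simp only [pvNextQuery]
    split_ifs <;> simp <;> exact le_trans (ih _) (Nat.le_succ _)

lemma pvNextQuery_rest_len_cons (line : String) (rest : List String) (d : Bool) :
    (pvNextQuery (line :: rest) d).2.1.length ≤ rest.length := by
  simp only [pvNextQuery]
  split_ifs <;> simp <;> exact pvNextQuery_rest_len rest _

-- the while loop of Python's _split_queries, one iteration per peeled statement
def pvSplitLoop (lines : List String) (inD : Bool) : List String :=
  match lines with
  | [] => []
  | line :: rest =>
    let r := pvNextQuery (line :: rest) inD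
    let query := PySem.Str.strip (PySem.Str.join "\n" r.1)
    (if pvKeep query then [query] else []) ++ pvSplitLoop r.2.1 r.2.2
termination_by lines.length
decreasing_by
  simp only [List.length_cons]
  exact Nat.lt_succ_of_le (pvNextQuery_rest_len_cons line rest inD)

def split_queries_py_alt (sql : String) : List String :=
  pvSplitLoop ((PySem.Str.split? sql "\n").getD []) false

-- ===== PRECONDITION & SPEC =====
def Spec_split_queries_py (sql : String) (out : List String) : Prop := out = split_queries_py_alt sql
instance (sql : String) (out : List String) : Decidable (Spec_split_queries_py sql out) := by unfold Spec_split_queries_py; infer_instance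

-- ===== CLAIM (what is proved, stated in full; the proofs are below) =====
def Claim_equal_split_queries_py : Prop := ∀ (sql : String), Dom_split_queries_py sql → Spec_split_queries_py sql (split_queries_py sql)

-- ===== LEMMAS AND PROOFS =====

lemma pvSplitLoop_nil (d : Bool) : pvSplitLoop [] d = [] := by
  rw [pvSplitLoop.eq_def]

lemma pvSplitLoop_cons (line : String) (rest : List String) (d : Bool) :
    pvSplitLoop (line :: rest) d =
      (if pvKeep (PySem.Str.strip (PySem.Str.join "\n" (pvNextQuery (line :: rest) d).1))
       then [PySem.Str.strip (PySem.Str.join "\n" (pvNextQuery (line :: rest) d).1)] else []) ++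
      pvSplitLoop (pvNextQuery (line :: rest) d).2.1 (pvNextQuery (line :: rest) d).2.2 := by
  rw [pvSplitLoop.eq_def]

-- proof-only device: emit a buffer as A/B do, nothing for an empty buffer
def pvEmitIf : List String → List String
  | [] => []
  | l :: ls =>
    if pvKeep (PySem.Str.strip (PySem.Str.join "\n" (l :: ls)))
    then [PySem.Str.strip (PySem.Str.join "\n" (l :: ls))] else []

lemma pvEmitIf_eq (s : List String) (h : s ≠ []) :
    pvEmitIf s = if pvKeep (PySem.Str.strip (PySem.Str.join "\n" s))
                 then [PySem.Str.strip (PySem.Str.join "\n" s)] else [] := by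
  cases s with
  | nil => exact absurd rfl h
  | cons l ls => rfl

-- B's run continued from a partially-filled buffer `cur` (proof-only device)
def pvCont (cur : List String) (inD : Bool) (lines : List String) : List String :=
  pvEmitIf (cur ++ (pvNextQuery lines inD).1) ++
    pvSplitLoop (pvNextQuery lines inD).2.1 (pvNextQuery lines inD).2.2

-- A's tail flush
def pvFinish (st : List String × List String × Bool) : List String :=
  if st.2.1 != [] then
    if pvKeep (PySem.Str.strip (PySem.Str.join "\n" st.2.1)) then st.1 ++ [PySem.Str.strip (PySem.Str.join "\n" st.2.1)]
    else st.1
  else st.1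

lemma pvNextQuery_fst_ne_nil (line : String) (rest : List String) (d : Bool) :
    (pvNextQuery (line :: rest) d).1 ≠ [] := by
  simp only [pvNextQuery]
  split_ifs <;> simp

lemma pvCont_nil_eq (lines : List String) (d : Bool) :
    pvCont [] d lines = pvSplitLoop lines d := by
  cases lines with
  | nil => simp [pvCont, pvNextQuery, pvEmitIf, pvSplitLoop_nil]
  | cons line rest =>
    rw [pvSplitLoop_cons]
    simp only [pvCont, List.nil_append]
    rw [pvEmitIf_eq _ (pvNextQuery_fst_ne_nil line rest d)]

lemma pv_key (lines : List String) (cur : List String) (d : Bool) (qs : List String) :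
    pvFinish (lines.foldl pvStepA (qs, cur, d)) = qs ++ pvCont cur d lines := by
  induction lines generalizing cur d qs with
  | nil =>
    simp only [List.foldl_nil, pvCont, pvNextQuery, List.append_nil, pvSplitLoop_nil]
    by_cases hc : cur = []
    · subst hc; simp [pvFinish, pvEmitIf]
    · rw [pvEmitIf_eq _ hc]
      simp only [pvFinish]
      rw [if_pos (by simpa using hc : ((qs, cur, d).2.1 != []) = true)]
      split_ifs <;> simp
  | cons line rest ih =>
    simp only [List.foldl_cons]
    simp only [pvStepA]
    by_cases h1 : (PySem.Str.startswith (PySem.Str.strip line) "--" || PySem.Str.strip line == "") = true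
    · -- comment/blank line: buffered in both
      rw [if_pos h1, ih]
      congr 1
      simp only [pvCont, pvNextQuery, if_pos h1, List.append_assoc, List.cons_append,
        List.nil_append]
    · rw [if_neg h1]
      -- the toggled dollar state is the same expression in both ports
      have htog : (if PySem.Str.isIn "$$" line then
                     (if PySem.Str.count line "$$" % 2 == 1 then !d else d)
                   else d)
                = (if PySem.Str.isIn "$$" line && PySem.Str.count line "$$" % 2 == 1
                   then !d else d) := by
        cases PySem.Str.isIn "$$" line <;> simp
      rw [htog]
      by_cases h2 : (if PySem.Str.isIn "$$" line && PySem.Str.count line "$$" % 2 == 1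
                     then !d else d) = true
      · -- inside a dollar block: buffered in both
        rw [if_pos h2, ih]
        congr 1
        simp only [pvCont, pvNextQuery, if_neg h1, h2]
        simp [List.append_assoc]
      · rw [if_neg h2]
        have h2' : (if PySem.Str.isIn "$$" line && PySem.Str.count line "$$" % 2 == 1
                    then !d else d) = false := by simpa using h2
        by_cases h3 : PySem.Str.endswith (PySem.Str.strip line) ";" = true
        · -- boundary line: A flushes inline, B's pvNextQuery returns here
          rw [if_pos h3, ih]
          rw [pvCont_nil_eq]
          simp only [pvCont, pvNextQuery, if_neg h1, h2', h3]
          simp only [Bool.not_false, Bool.true_and, reduceIte]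
          rw [pvEmitIf_eq _ (by simp : cur ++ [line] ≠ [])]
          split_ifs <;> simp_all [List.append_assoc]
        · -- ordinary code line: buffered in both
          rw [if_neg h3, ih]
          congr 1
          simp only [pvCont, pvNextQuery, if_neg h1, h2', h3]
          simp [List.append_assoc]

-- ===== VERDICT (by name: the statement is the Claim_ definition above) =====
theorem split_queries_py_spec : Claim_equal_split_queries_py := by
  intro sql _
  unfold Spec_split_queries_py split_queries_py split_queries_py_alt
  have h := pv_key ((PySem.Str.split? sql "\n").getD []) [] false []
  rw [pvCont_nil_eq] at h
  simpa [pvFinish] using h
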